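-- pv_equiv track=rewrite | github.com/rachellefriloux-alt/Sallie | progeny_root/Peer/core/synthesis.py | _extract_best_question
-- ===== SOURCE A (Python) =====
-- def _extract_best_question(text: str) -> str:
--     """Extract the most important question from text."""
--     lines = text.split('\n')
--     questions_found = []
--
--     for i, line in enumerate(lines):
--         if '?' in line:
--             questions_found.append((i, line))
--
--     if not questions_found:
--         return text
--
--     if len(questions_found) == 1:
--         return text
--
--     # Keep first question, remove others
--     first_q_line_idx = questions_found[0][0]
--     cleaned_lines = []
--
--     for i, line in enumerate(lines):
--         if i < first_q_line_idx:
--             cleaned_lines.append(line)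
--         elif i == first_q_line_idx:
--             cleaned_lines.append(line)
--         elif '?' not in line:
--             cleaned_lines.append(line)
--         # Skip lines with additional questions
--
--     return '\n'.join(cleaned_lines)
-- ===== SOURCE B (Python) =====
-- def _extract_best_question(text: str) -> str:
--     """Extract the most important question from text."""
--     kept = []
--     seen_question = False
--     for line in text.split('\n'):
--         if '?' not in line:
--             kept.append(line)
--         elif not seen_question:
--             kept.append(line)
--             seen_question = True
--     return '\n'.join(kept)
-- ===== Notes on version B (the rewrite author's own statement) =====
-- stated objective: simpler
-- what changed: Replaces A's two passes (collect all question lines with indices, then rebuild by comparing each index against the first question's index) and its 0/1-question early returns by a single filtering pass with a seen_question flag; the early returns are subsumed because joining an unfiltered split round-trips the text.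
import Mathlib
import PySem

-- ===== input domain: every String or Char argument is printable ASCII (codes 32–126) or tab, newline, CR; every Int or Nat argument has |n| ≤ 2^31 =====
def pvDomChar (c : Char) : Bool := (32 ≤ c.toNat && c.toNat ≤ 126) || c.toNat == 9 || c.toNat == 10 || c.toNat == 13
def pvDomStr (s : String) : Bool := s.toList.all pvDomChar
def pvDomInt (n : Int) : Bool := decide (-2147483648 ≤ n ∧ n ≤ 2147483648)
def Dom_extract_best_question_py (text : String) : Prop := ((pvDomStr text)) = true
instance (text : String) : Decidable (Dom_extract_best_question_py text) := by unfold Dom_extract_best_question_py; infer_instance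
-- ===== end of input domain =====

-- B replaces A's two passes (collect question lines with indices, rebuild by index comparison)
-- and its 0/1-question early returns by a single filtering pass with a seen-question flag: simpler.


-- ===== PORT A =====
-- sep "\n" is nonempty, so split? always returns some; .getD [] never fires
def extract_best_question_py (text : String) : String :=
  let lines := (PySem.Str.split? text "\n").getD []
  let questions_found := (PySem.List.enumerate lines).foldl
    (fun acc p => if PySem.Str.isIn "?" p.2 then acc ++ [p] else acc) ([] : List (Int × String))
  if questions_found.isEmpty then text
  else if questions_found.length == 1 then text
  else
    let first_q_line_idx := questions_found.headI.1
    let cleaned_lines := (PySem.List.enumerate lines).foldl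
      (fun acc p =>
        if p.1 < first_q_line_idx then acc ++ [p.2]
        else if p.1 == first_q_line_idx then acc ++ [p.2]
        else if !(PySem.Str.isIn "?" p.2) then acc ++ [p.2]
        else acc) ([] : List String)
    PySem.Str.join "\n" cleaned_lines

-- ===== PORT B =====
-- single pass with a seen-question flag (Source B's loop)
def bqFilter : List String → Bool → List String
  | [], _ => []
  | l :: ls, seen =>
    if !(PySem.Str.isIn "?" l) then l :: bqFilter ls seen
    else if !seen then l :: bqFilter ls true
    else bqFilter ls seen

def extract_best_question_py_alt (text : String) : String :=
  PySem.Str.join "\n" (bqFilter ((PySem.Str.split? text "\n").getD []) false)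

-- ===== PRECONDITION & SPEC =====
def Spec_extract_best_question_py (text : String) (out : String) : Prop := out = extract_best_question_py_alt text
instance (text : String) (out : String) : Decidable (Spec_extract_best_question_py text out) := by unfold Spec_extract_best_question_py; infer_instance

-- ===== CLAIM (what is proved, stated in full; the proofs are below) =====
def Claim_equal_extract_best_question_py : Prop := ∀ (text : String), Dom_extract_best_question_py text → Spec_extract_best_question_py text (extract_best_question_py text)

-- ===== LEMMAS AND PROOFS =====

theorem dropWhile_head_false {p : String → Bool} : ∀ (L : List String) (q : String) (S : List String),
    List.dropWhile p L = q :: S → p q = false := by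
  intro L
  induction L with
  | nil => intro q S h; simp at h
  | cons x xs ih =>
    intro q S h
    rw [List.dropWhile_cons] at h
    by_cases hx : p x = true
    · rw [if_pos hx] at h; exact ih _ _ h
    · rw [if_neg hx] at h
      cases h
      simpa using hx

theorem go_single (c : Char) : ∀ (fuel : Nat) (l cur : List Char) (acc : List (List Char)), l.length ≤ fuel →
    PySem.Chars.splitOn.go [c] fuel l cur acc
      = acc.reverse ++ List.modifyHead (cur.reverse ++ ·) (List.splitOnP (· == c) l) := by
  intro fuel
  induction fuel with
  | zero =>
    intro l cur acc h
    have : l = [] := List.length_eq_zero_iff.mp (Nat.le_zero.mp h)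
    subst this
    simp [PySem.Chars.splitOn.go, List.splitOnP_nil]
  | succ n ih =>
    intro l cur acc h
    cases l with
    | nil => simp [PySem.Chars.splitOn.go, List.splitOnP_nil]
    | cons a rest =>
      rw [PySem.Chars.splitOn.go]
      by_cases hc : a = c
      · subst hc
        have hpre : [a].isPrefixOf (a :: rest) = true := by simp [List.isPrefixOf]
        rw [if_pos hpre]
        rw [ih _ _ _ (by simpa using Nat.le_of_succ_le_succ h)]
        rw [List.splitOnP_cons, if_pos (by simp)]
        obtain ⟨h0, t, hsp⟩ := List.exists_cons_of_ne_nil (List.splitOnP_ne_nil (· == a) rest)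
        simp [hsp, List.modifyHead]
      · have hpre : [c].isPrefixOf (a :: rest) = false := by
          simp [List.isPrefixOf]; exact fun hh => absurd hh.symm hc
        rw [if_neg (by simp [hpre])]
        rw [ih _ _ _ (by simpa using Nat.le_of_succ_le_succ h)]
        rw [List.splitOnP_cons, if_neg (by simp [hc])]
        obtain ⟨h0, t, hsp⟩ := List.exists_cons_of_ne_nil (List.splitOnP_ne_nil (· == c) rest)
        simp [hsp, List.modifyHead]

theorem chars_splitOn_single (c : Char) (s : List Char) :
    PySem.Chars.splitOn s [c] = List.splitOn c s := by
  rw [PySem.Chars.splitOn, go_single c _ _ _ _ (Nat.le_succ _)]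
  obtain ⟨h0, t, hsp⟩ := List.exists_cons_of_ne_nil (List.splitOnP_ne_nil (· == c) s)
  simp [List.splitOn, hsp, List.modifyHead]

theorem split_lines_eq (text : String) :
    (PySem.Str.split? text "\n").getD []
      = (List.splitOn '\n' text.toList).map String.ofList := by
  rw [PySem.Str.split?, PySem.Chars.split?]
  have : ("\n" : String).toList = ['\n'] := rfl
  rw [this]
  simp [chars_splitOn_single]

theorem join_map_ofList (L : List (List Char)) :
    PySem.Str.join "\n" (L.map String.ofList) = String.ofList (['\n'].intercalate L) := by
  rw [PySem.Str.join, PySem.Chars.join]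
  congr 1
  · simp [List.map_map, Function.comp_def]

theorem join_roundtrip (text : String) :
    PySem.Str.join "\n" ((PySem.Str.split? text "\n").getD []) = text := by
  rw [split_lines_eq, join_map_ofList, List.intercalate_splitOn, String.ofList_toList]


theorem qf_eq : ∀ (L : List String) (s : Int) (acc : List (Int × String)),
    (PySem.List.enumerate L s).foldl
        (fun acc p => if PySem.Str.isIn "?" p.2 then acc ++ [p] else acc) acc
      = acc ++ (PySem.List.enumerate L s).filter (fun p => PySem.Str.isIn "?" p.2) := by
  intro L
  induction L with
  | nil => simp [PySem.List.enumerate]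
  | cons x xs ih =>
    intro s acc
    rw [PySem.List.enumerate_cons]
    cases h : PySem.Str.isIn "?" x with
    | true =>
      simp only [List.foldl_cons, List.filter_cons, h, if_true]
      rw [ih]; simp
    | false =>
      simp only [List.foldl_cons, List.filter_cons, h, Bool.false_eq_true, if_false]
      exact ih _ _

theorem enumFilter_nil_iff : ∀ (L : List String) (s : Int),
    (PySem.List.enumerate L s).filter (fun p => PySem.Str.isIn "?" p.2) = []
      ↔ ∀ l ∈ L, PySem.Str.isIn "?" l = false := by
  intro L
  induction L with
  | nil => simp [PySem.List.enumerate]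
  | cons x xs ih =>
    intro s
    rw [PySem.List.enumerate_cons]
    simp only [List.filter_cons, List.mem_cons]
    cases h : PySem.Str.isIn "?" x with
    | true =>
      simp only [h, if_true]
      constructor
      · intro hh; exact absurd hh (List.cons_ne_nil _ _)
      · intro hh
        rw [hh x (Or.inl rfl)] at h
        exact absurd h Bool.false_ne_true
    | false =>
      simp only [h, Bool.false_eq_true, if_false]
      rw [ih]
      constructor
      · intro hh l hl
        rcases hl with rfl | hl
        · exact h
        · exact hh l hl
      · intro hh l hl; exact hh l (Or.inr hl)

theorem enumFilter_decomp (q : String) (S : List String)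
    (hq : PySem.Str.isIn "?" q = true) :
    ∀ (P : List String) (s : Int), (∀ l ∈ P, PySem.Str.isIn "?" l = false) →
    (PySem.List.enumerate (P ++ q :: S) s).filter (fun p => PySem.Str.isIn "?" p.2)
      = (s + P.length, q) :: (PySem.List.enumerate S (s + P.length + 1)).filter (fun p => PySem.Str.isIn "?" p.2) := by
  intro P
  induction P with
  | nil =>
    intro s hP
    simp only [List.nil_append, List.length_nil]
    rw [PySem.List.enumerate_cons]
    simp only [List.filter_cons, hq, if_true]
    norm_num
  | cons p ps ih =>
    intro s hP
    have hp : PySem.Str.isIn "?" p = false := hP p (List.mem_cons_self ..)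
    simp only [List.cons_append]
    rw [PySem.List.enumerate_cons]
    simp only [List.filter_cons, hp, Bool.false_eq_true, if_false]
    rw [ih (s + 1) (fun l hl => hP l (List.mem_cons_of_mem _ hl))]
    have h1 : s + 1 + (ps.length : Int) = s + ((p :: ps).length : Int) := by
      simp; ring
    rw [h1]

theorem cleanFold_gt (idx : Int) : ∀ (L : List String) (s : Int) (acc : List String), idx < s →
    (PySem.List.enumerate L s).foldl
      (fun acc p =>
        if p.1 < idx then acc ++ [p.2]
        else if p.1 == idx then acc ++ [p.2]
        else if !(PySem.Str.isIn "?" p.2) then acc ++ [p.2]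
        else acc) acc
      = acc ++ L.filter (fun l => !(PySem.Str.isIn "?" l)) := by
  intro L
  induction L with
  | nil => intro s acc _; simp [PySem.List.enumerate]
  | cons x xs ih =>
    intro s acc hlt
    rw [PySem.List.enumerate_cons]
    simp only [List.foldl_cons, List.filter_cons]
    rw [if_neg (by omega), if_neg (by simpa using (by omega : ¬ s = idx))]
    cases h : PySem.Str.isIn "?" x with
    | true =>
      simp only [h, Bool.not_true, Bool.false_eq_true, if_false]
      exact ih (s + 1) acc (by omega)
    | false =>
      simp only [h, Bool.not_false, if_true]
      rw [ih (s + 1) _ (by omega)]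
      simp

theorem cleanFold_main (q : String) (S : List String) : ∀ (P : List String) (s : Int) (acc : List String),
    (PySem.List.enumerate (P ++ q :: S) s).foldl
      (fun acc p =>
        if p.1 < s + P.length then acc ++ [p.2]
        else if p.1 == s + P.length then acc ++ [p.2]
        else if !(PySem.Str.isIn "?" p.2) then acc ++ [p.2]
        else acc) acc
      = acc ++ P ++ q :: S.filter (fun l => !(PySem.Str.isIn "?" l)) := by
  intro P
  induction P with
  | nil =>
    intro s acc
    simp only [List.nil_append, List.length_nil, Nat.cast_zero, add_zero]
    rw [PySem.List.enumerate_cons]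
    simp only [List.foldl_cons]
    rw [if_neg (by omega), if_pos (by simp)]
    rw [cleanFold_gt s S (s + 1) _ (by omega)]
    simp
  | cons p ps ih =>
    intro s acc
    simp only [List.cons_append]
    rw [PySem.List.enumerate_cons]
    simp only [List.foldl_cons]
    rw [if_pos (by simp)]
    have h1 : s + ((p :: ps).length : Int) = (s + 1) + ps.length := by simp; ring
    simp only [h1]
    rw [ih (s + 1) (acc ++ [p])]
    simp

theorem bq_true : ∀ (L : List String), bqFilter L true = L.filter (fun l => !(PySem.Str.isIn "?" l)) := by
  intro L
  induction L with
  | nil => rfl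
  | cons x xs ih =>
    rw [bqFilter, List.filter_cons]
    cases h : PySem.Str.isIn "?" x with
    | true => simp only [h, Bool.not_true, Bool.false_eq_true, if_false]; exact ih
    | false => simp only [h, Bool.not_false, if_true]; rw [ih]

theorem bq_clean : ∀ (L : List String) (b : Bool), (∀ l ∈ L, PySem.Str.isIn "?" l = false) →
    bqFilter L b = L := by
  intro L
  induction L with
  | nil => intro b _; rfl
  | cons x xs ih =>
    intro b hL
    rw [bqFilter]
    rw [if_pos (by simp only [hL x (List.mem_cons_self ..), Bool.not_false])]
    rw [ih b (fun l hl => hL l (List.mem_cons_of_mem _ hl))]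

theorem bq_decomp (q : String) (S : List String) (hq : PySem.Str.isIn "?" q = true) :
    ∀ (P : List String), (∀ l ∈ P, PySem.Str.isIn "?" l = false) →
    bqFilter (P ++ q :: S) false = P ++ q :: S.filter (fun l => !(PySem.Str.isIn "?" l)) := by
  intro P
  induction P with
  | nil =>
    intro _
    simp only [List.nil_append]
    rw [bqFilter]
    rw [if_neg (by simp only [hq, Bool.not_true, Bool.false_eq_true]; exact fun h => absurd h (by simp)), if_pos (by simp)]
    rw [bq_true]
  | cons p ps ih =>
    intro hP
    simp only [List.cons_append]
    rw [bqFilter]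
    rw [if_pos (by simp only [hP p (List.mem_cons_self ..), Bool.not_false])]
    rw [ih (fun l hl => hP l (List.mem_cons_of_mem _ hl))]


-- ===== VERDICT (by name: the statement is the Claim_ definition above) =====
theorem extract_best_question_py_spec : Claim_equal_extract_best_question_py := by
  intro text _
  unfold Spec_extract_best_question_py extract_best_question_py_alt
  simp only [extract_best_question_py]
  set L := (PySem.Str.split? text "\n").getD [] with hLdef
  rw [qf_eq]
  simp only [List.nil_append]
  cases hdw : List.dropWhile (fun l => !(PySem.Str.isIn "?" l)) L with
  | nil =>
    have htw : List.takeWhile (fun l => !(PySem.Str.isIn "?" l)) L = L := by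
      conv_rhs => rw [← List.takeWhile_append_dropWhile (p := fun l => !(PySem.Str.isIn "?" l)) (l := L)]
      rw [hdw, List.append_nil]
    have hclean : ∀ l ∈ L, PySem.Str.isIn "?" l = false := by
      intro l hl
      have hmem : l ∈ List.takeWhile (fun l => !(PySem.Str.isIn "?" l)) L := by rw [htw]; exact hl
      simpa using List.mem_takeWhile_imp hmem
    rw [(enumFilter_nil_iff L 0).mpr hclean]
    simp only [List.isEmpty_nil, if_true]
    rw [bq_clean L false hclean]
    exact (join_roundtrip text).symm
  | cons q S =>
    have hne : List.dropWhile (fun l => !(PySem.Str.isIn "?" l)) L ≠ [] := by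
      rw [hdw]; simp
    have hq : PySem.Str.isIn "?" q = true := by
      have := dropWhile_head_false _ q S hdw
      simpa using this
    have hPc : ∀ l ∈ List.takeWhile (fun l => !(PySem.Str.isIn "?" l)) L,
        PySem.Str.isIn "?" l = false := by
      intro l hl
      simpa using List.mem_takeWhile_imp (p := fun l => !(PySem.Str.isIn "?" l)) (l := L) hl
    have hdecomp : L = List.takeWhile (fun l => !(PySem.Str.isIn "?" l)) L ++ q :: S := by
      conv_lhs => rw [← List.takeWhile_append_dropWhile (p := fun l => !(PySem.Str.isIn "?" l)) (l := L)]
      rw [hdw]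
    set P := List.takeWhile (fun l => !(PySem.Str.isIn "?" l)) L with hPdef
    rw [hdecomp, enumFilter_decomp q S hq P 0 hPc]
    simp only [zero_add]
    cases hrest : (PySem.List.enumerate S ((P.length : Int) + 1)).filter (fun p => PySem.Str.isIn "?" p.2) with
    | nil =>
      simp only [List.isEmpty_cons, Bool.false_eq_true, if_false, List.length_cons,
        List.length_nil, Nat.zero_add, BEq.rfl, if_true]
      have hSc : ∀ l ∈ S, PySem.Str.isIn "?" l = false := (enumFilter_nil_iff S _).mp hrest
      rw [bq_decomp q S hq P hPc]
      rw [List.filter_eq_self.mpr (fun l hl => by rw [Bool.not_eq_true']; exact hSc l hl)]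
      rw [← hdecomp]
      exact (join_roundtrip text).symm
    | cons r rs =>
      simp only [List.isEmpty_cons, Bool.false_eq_true, if_false, List.length_cons]
      rw [if_neg (by simp)]
      simp only [List.headI]
      have hfold := cleanFold_main q S P 0 []
      simp only [zero_add, List.nil_append] at hfold
      rw [bq_decomp q S hq P hPc]
      exact congrArg (PySem.Str.join "\n") hfold
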